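-- pv_equiv track=rewrite | github.com/VorosDavidVasvari/Mozi | Main.py | CalcIncome
-- ===== SOURCE A (Python) =====
-- def CalcIncome(seats: list) -> int:
--     income: int = 0
--
--     for i in range(len(seats)):
--         for j in range(len(seats[i])):
--             for k in range(len(seats[i][j])):
--                 if seats[i][j][k] == 'A':
--                     income += 2500
--                 elif seats[i][j][k] == 'S':
--                     income += 2100
--                 elif seats[i][j][k] == 'E':
--                     income += 1300
--
--     return income
-- ===== SOURCE B (Python) =====
-- PRICE = {'A': 2500, 'S': 2100, 'E': 1300}
--
--
-- def _halve(cells):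
--     # divide-and-conquer sum of seat prices over a flat cell list
--     if not cells:
--         return 0
--     if len(cells) == 1:
--         return PRICE.get(cells[0], 0)
--     mid = len(cells) // 2
--     return _halve(cells[:mid]) + _halve(cells[mid:])
--
--
-- def CalcIncome(seats: list) -> int:
--     cells = [s for row in seats for col in row for s in col]
--     return _halve(cells)
-- ===== Notes on version B (the rewrite author's own statement) =====
-- stated objective: alternative
-- what changed: B flattens the 3D grid once and sums prices by recursive divide-and-conquer (split the cell list in halves, price table lookup at the leaves) instead of A's triple nested index loop with an if/elif accumulator.
import Mathlib
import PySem

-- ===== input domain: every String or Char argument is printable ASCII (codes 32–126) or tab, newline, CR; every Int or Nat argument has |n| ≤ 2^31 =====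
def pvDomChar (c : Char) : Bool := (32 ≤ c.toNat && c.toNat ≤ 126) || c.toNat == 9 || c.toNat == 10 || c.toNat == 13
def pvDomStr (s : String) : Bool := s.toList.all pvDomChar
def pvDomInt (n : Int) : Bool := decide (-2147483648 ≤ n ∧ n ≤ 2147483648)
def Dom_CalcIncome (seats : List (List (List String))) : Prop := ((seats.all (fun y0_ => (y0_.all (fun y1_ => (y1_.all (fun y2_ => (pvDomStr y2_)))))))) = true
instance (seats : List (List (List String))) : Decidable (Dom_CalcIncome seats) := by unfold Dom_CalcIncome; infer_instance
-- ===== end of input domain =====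

-- B flattens the grid once and sums seat prices by recursive divide-and-conquer halving with a
-- price-table lookup at the leaves, instead of A's triple nested index loop with an if/elif accumulator.
-- ===== PORT A =====
def CalcIncome (seats : List (List (List String))) : Int :=
  seats.foldl (fun income row =>
    row.foldl (fun income col =>
      col.foldl (fun income s =>
        if s = "A" then income + 2500
        else if s = "S" then income + 2100
        else if s = "E" then income + 1300
        else income) income) income) 0

-- ===== PORT B =====
-- PRICE = {'A': 2500, 'S': 2100, 'E': 1300}
def pvPRICE : PySem.Dict String Int := PySem.Dict.ofList [("A", 2500), ("S", 2100), ("E", 1300)]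

-- _halve(cells): divide-and-conquer sum of PRICE.get(c, 0) over cells
def pvHalve (cells : List String) : Int :=
  if cells = [] then 0
  else if cells.length = 1 then
    -- cells[0]: in range here (length = 1), so pyGet? is some; the none branch is unreachable
    match PySem.List.pyGet? cells 0 with
    | some s => PySem.Dict.getD pvPRICE s 0
    | none => 0
  else
    let mid : Int := PySem.Int.floordiv (cells.length : Int) 2
    pvHalve (PySem.List.slice cells none (some mid)) +
      pvHalve (PySem.List.slice cells (some mid) none)
termination_by cells.length
decreasing_by
  all_goals
    have hm : (PySem.Int.floordiv (cells.length : Int) 2) = ((cells.length / 2 : Nat) : Int) :=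
      PySem.Int.floordiv_natCast cells.length 2
    rename_i h0 h1
    have hlen : 2 ≤ cells.length := by
      rcases cells with _ | ⟨a, _ | ⟨b, t⟩⟩ <;> simp_all
  · rw [hm, PySem.List.slice_to_natCast]; simp; omega
  · rw [hm, PySem.List.slice_from_natCast]; simp; omega

def CalcIncome_alt (seats : List (List (List String))) : Int :=
  pvHalve (seats.flatMap (fun row => row.flatMap (fun col => col)))

-- ===== PRECONDITION & SPEC =====
def Spec_CalcIncome (seats : List (List (List String))) (out : Int) : Prop := out = CalcIncome_alt seats
instance (seats : List (List (List String))) (out : Int) : Decidable (Spec_CalcIncome seats out) := by unfold Spec_CalcIncome; infer_instance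

-- ===== CLAIM (what is proved, stated in full; the proofs are below) =====
def Claim_equal_CalcIncome : Prop := ∀ (seats : List (List (List String))), Dom_CalcIncome seats → Spec_CalcIncome seats (CalcIncome seats)

-- ===== LEMMAS AND PROOFS =====
-- price of one seat string, as A's if-chain computes it
def pvPrice (s : String) : Int :=
  if s = "A" then 2500 else if s = "S" then 2100 else if s = "E" then 1300 else 0

theorem price_eq_getD (s : String) : PySem.Dict.getD pvPRICE s 0 = pvPrice s := by
  have : pvPRICE = PySem.Dict.mk [("A", 2500), ("S", 2100), ("E", 1300)] := by decide
  rw [this]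
  simp [pvPrice, PySem.Dict.getD, PySem.Dict.get?_mk_cons]
  by_cases hA : s = "A" <;> by_cases hS : s = "S" <;> by_cases hE : s = "E" <;>
    simp_all [eq_comm, PySem.Dict.get?]

theorem pvHalve_eq_sum (cells : List String) : pvHalve cells = (cells.map pvPrice).sum := by
  induction cells using pvHalve.induct with
  | case1 => simp [pvHalve]
  | case2 cells h0 h1 s hs =>
    rw [pvHalve]; simp only [h0, h1, if_false, if_true, hs]
    rcases cells with _ | ⟨a, t⟩
    · simp at h0
    · simp at h1; subst h1
      simp [PySem.List.pyGet?, PySem.List.pyIdx?] at hs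
      simp [hs, price_eq_getD]
  | case3 cells h0 h1 hnone =>
    exfalso
    rcases cells with _ | ⟨a, t⟩
    · simp at h0
    · simp [PySem.List.pyGet?, PySem.List.pyIdx?] at hnone
  | case4 cells h0 h1 mid ih1 ih2 =>
    rw [pvHalve]; simp only [h0, h1, if_false]
    have hm : (PySem.Int.floordiv (cells.length : Int) 2) = ((cells.length / 2 : Nat) : Int) :=
      PySem.Int.floordiv_natCast cells.length 2
    simp only [mid] at ih1 ih2
    rw [hm] at ih1 ih2 ⊢
    rw [PySem.List.slice_to_natCast] at ih1 ⊢
    rw [PySem.List.slice_from_natCast] at ih2 ⊢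
    rw [ih1, ih2]
    conv_rhs => rw [← List.take_append_drop (cells.length / 2) cells]
    rw [List.map_append, List.sum_append]

theorem foldl_price (l : List String) (acc : Int) :
    l.foldl (fun income s =>
        if s = "A" then income + 2500
        else if s = "S" then income + 2100
        else if s = "E" then income + 1300
        else income) acc = acc + (l.map pvPrice).sum := by
  induction l generalizing acc with
  | nil => simp
  | cons h tl ih => simp [ih, pvPrice]; split_ifs <;> ring

theorem foldl_row (row : List (List String)) (acc : Int) :
    row.foldl (fun income col =>
      col.foldl (fun income s =>
        if s = "A" then income + 2500
        else if s = "S" then income + 2100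
        else if s = "E" then income + 1300
        else income) income) acc
    = acc + ((row.flatMap (fun col => col)).map pvPrice).sum := by
  induction row generalizing acc with
  | nil => simp
  | cons col tl ih => rw [List.foldl_cons, foldl_price, ih]; simp; ring

theorem foldl_outer (seats : List (List (List String))) (acc : Int) :
    seats.foldl (fun income row =>
      row.foldl (fun income col =>
        col.foldl (fun income s =>
          if s = "A" then income + 2500
          else if s = "S" then income + 2100
          else if s = "E" then income + 1300
          else income) income) income) acc
    = acc + ((seats.flatMap (fun row => row.flatMap (fun col => col))).map pvPrice).sum := by
  induction seats generalizing acc with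
  | nil => simp
  | cons row tl ih => rw [List.foldl_cons, foldl_row, ih]; simp; ring

-- ===== VERDICT (by name: the statement is the Claim_ definition above) =====
theorem CalcIncome_spec : Claim_equal_CalcIncome := by
  intro seats _
  unfold Spec_CalcIncome CalcIncome CalcIncome_alt
  rw [foldl_outer, pvHalve_eq_sum]
  ring
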